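-- pv_equiv track=rewrite | github.com/joegimmi/commandcenter | gimmi_routes.py | acceptable
-- ===== SOURCE A (Python) =====
-- def acceptable(lst, pickup_string = 'PU', dropoff_string = 'DO'):
--     '''Is the list acceptable in the sense that every DOn comes after its
--     respective PUn?'''
--     acceptable_list = True
--     all_true = []
--     for i in lst:
--         #Now I am accessing individual elements
--         #I need to identify every PUn in every list and then
--         length_pickup_string = len(pickup_string)
--         length_dropoff_string = len(dropoff_string)
--
--         #if the first strings of the list element are equal to the pickup_string,
--         #then strip out the pickup_string section and determine what number index
--         #it is.
--         dropoff_after = False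
--         if i[:length_pickup_string] == pickup_string:
--             index_str_format = i.strip(pickup_string)
--             #Now look for the following 'DO' and make sure it is after.
--             length_of_list = len(lst)
--             index_of_current_element = lst.index(i)
--
--             #Looking after the position of the current index
--             for item in lst[index_of_current_element:]:
--                 if item[:length_dropoff_string] == dropoff_string:
--                     #Now check that the index number following 'DO' is the same as 'PU'
--                     do_stripped = item.strip(dropoff_string)
--                     if do_stripped == index_str_format:
--                         dropoff_after = True
--
--             #If the DOn was found after, we have another 'true' occurrence
--             all_true.append(dropoff_after)
--
--         #Now check the all_true list and make sure all elements are true,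
--         #Otherwise this is not an acceptable list.
--         for i in all_true:
--             if i == False:
--                 acceptable_list = False
--     return(acceptable_list)
-- ===== SOURCE B (Python) =====
-- def acceptable(lst, pickup_string='PU', dropoff_string='DO'):
--     lp = len(pickup_string)
--     ld = len(dropoff_string)
--     first_idx = {}
--     last_do = {}
--     for j, s in enumerate(lst):
--         if s not in first_idx:
--             first_idx[s] = j
--         if s[:ld] == dropoff_string:
--             last_do[s.strip(dropoff_string)] = j
--     return all(last_do.get(s.strip(pickup_string), -1) >= first_idx[s]
--                for s in lst if s[:lp] == pickup_string)
-- ===== Notes on version B (the rewrite author's own statement) =====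
-- stated objective: alternative
-- what changed: A rescans the list for every PU element (lst.index plus a full tail scan, and re-checks the whole all_true list each iteration); B makes one pass building a first-occurrence-index dict and a last-matching-DO-index dict, then answers each PU element with two dict lookups.
import Mathlib
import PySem

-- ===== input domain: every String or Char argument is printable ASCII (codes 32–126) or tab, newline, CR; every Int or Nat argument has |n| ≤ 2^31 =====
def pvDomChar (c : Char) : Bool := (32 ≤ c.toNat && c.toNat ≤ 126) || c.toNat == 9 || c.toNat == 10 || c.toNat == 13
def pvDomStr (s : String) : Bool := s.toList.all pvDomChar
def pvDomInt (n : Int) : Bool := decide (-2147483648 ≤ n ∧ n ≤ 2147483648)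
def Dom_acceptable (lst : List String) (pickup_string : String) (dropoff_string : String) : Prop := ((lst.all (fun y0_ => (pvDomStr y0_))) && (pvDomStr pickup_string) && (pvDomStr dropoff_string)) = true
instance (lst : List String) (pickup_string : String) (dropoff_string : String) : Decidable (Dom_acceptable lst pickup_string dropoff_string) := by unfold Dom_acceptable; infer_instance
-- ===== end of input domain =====

-- B replaces A's quadratic per-PU rescan (lst.index plus a scan of the tail for every PU element)
-- by one pass building a first-index dict and a last-DO-index dict, then one lookup per element (objective: alternative).

-- ===== PORT A =====
def acceptable (lst : List String) (pickup_string : String) (dropoff_string : String) : Bool :=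
  (lst.foldl
    (fun (st : Bool × List Bool) i =>
      let length_pickup_string := PySem.Str.len pickup_string
      let length_dropoff_string := PySem.Str.len dropoff_string
      let st :=
        if PySem.Str.slice i none (some (length_pickup_string : Int)) == pickup_string then
          let index_str_format := PySem.Str.stripChars i pickup_string
          -- lst.index(i): i is always an element of lst here, so index? is some; getD only makes it total
          let index_of_current_element := (PySem.List.index? lst i).getD 0
          let dropoff_after :=
            (PySem.List.slice lst (some (index_of_current_element : Int)) none).foldl
              (fun dropoff_after item =>
                if PySem.Str.slice item none (some (length_dropoff_string : Int)) == dropoff_string then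
                  if PySem.Str.stripChars item dropoff_string == index_str_format then true
                  else dropoff_after
                else dropoff_after)
              false
          (st.1, st.2 ++ [dropoff_after])
        else st
      (st.2.foldl (fun acceptable_list x => if x == false then false else acceptable_list) st.1, st.2))
    (true, [])).1

-- ===== PORT B =====
def acceptable_alt (lst : List String) (pickup_string : String) (dropoff_string : String) : Bool :=
  let lp := PySem.Str.len pickup_string
  let ld := PySem.Str.len dropoff_string
  let dicts :=
    (PySem.List.enumerate lst).foldl
      (fun (st : PySem.Dict String Int × PySem.Dict String Int) p =>
        ((if st.1.contains p.2 then st.1 else st.1.insert p.2 p.1),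
         (if PySem.Str.slice p.2 none (some (ld : Int)) == dropoff_string then
            st.2.insert (PySem.Str.stripChars p.2 dropoff_string) p.1
          else st.2)))
      (PySem.Dict.empty, PySem.Dict.empty)
  lst.all (fun s =>
    if PySem.Str.slice s none (some (lp : Int)) == pickup_string then
      decide (dicts.1.getD s 0 ≤ dicts.2.getD (PySem.Str.stripChars s pickup_string) (-1))
    else true)

-- ===== PRECONDITION & SPEC =====
def Spec_acceptable (lst : List String) (pickup_string : String) (dropoff_string : String) (out : Bool) : Prop := out = acceptable_alt lst pickup_string dropoff_string
instance (lst : List String) (pickup_string : String) (dropoff_string : String) (out : Bool) : Decidable (Spec_acceptable lst pickup_string dropoff_string out) := by unfold Spec_acceptable; infer_instance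

-- ===== CLAIM (what is proved, stated in full; the proofs are below) =====
def Claim_equal_acceptable : Prop := ∀ (lst : List String) (pickup_string : String) (dropoff_string : String), Dom_acceptable lst pickup_string dropoff_string → Spec_acceptable lst pickup_string dropoff_string (acceptable lst pickup_string dropoff_string)

-- ===== LEMMAS AND PROOFS =====

-- A's inner scan 'set the flag if a matching item occurs' is an 'any'
theorem pv_innerfold (Q R : String → Bool) (l : List String) (b : Bool) :
    l.foldl (fun d item => if Q item then (if R item then true else d) else d) b
      = (b || l.any (fun x => Q x && R x)) := by
  induction l generalizing b with
  | nil => simp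
  | cons x l ih =>
    rw [List.foldl_cons, ih]
    by_cases hQ : Q x <;> by_cases hR : R x <;> simp [hQ, hR]

-- A's re-check loop over all_true is an 'and'
theorem pv_andfold (l : List Bool) (b : Bool) :
    l.foldl (fun a x => if x == false then false else a) b = (b && l.all (fun x => x)) := by
  induction l generalizing b with
  | nil => simp
  | cons x l ih =>
    rw [List.foldl_cons, ih]
    cases x <;> cases b <;> simp

-- A's outer loop invariant: the running flag is the conjunction of the collected all_true list
theorem pv_outer (P ok : String → Bool) (l : List String) (allT : List Bool) :
    (l.foldl (fun (st : Bool × List Bool) i =>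
        let st' := if P i then (st.1, st.2 ++ [ok i]) else st
        (st'.2.foldl (fun a x => if x == false then false else a) st'.1, st'.2))
      (allT.all (fun x => x), allT)).1
    = (allT ++ l.filterMap (fun i => if P i then some (ok i) else none)).all (fun x => x) := by
  induction l generalizing allT with
  | nil => simp
  | cons i l ih =>
    by_cases hP : P i
    · rw [List.foldl_cons]
      simp only [hP, ite_true]
      rw [pv_andfold]
      rw [show ((allT.all fun x => x) && ((allT ++ [ok i]).all fun x => x))
            = ((allT ++ [ok i]).all fun x => x) from by
          cases h : allT.all (fun x => x) <;> simp [List.all_append, h]]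
      exact (ih (allT ++ [ok i])).trans (by simp [hP, List.all_append])
    · rw [List.foldl_cons]
      simp only [hP, ite_false, Bool.false_eq_true]
      rw [pv_andfold, Bool.and_self]
      exact (ih allT).trans (by simp [hP])

-- pointwise bridge between A's filterMap-of-flags form and B's all form
theorem pv_bridge (P ok h2 : String → Bool) (l : List String)
    (h : ∀ s ∈ l, P s = true → ok s = h2 s) :
    (l.filterMap (fun i => if P i then some (ok i) else none)).all (fun x => x)
      = l.all (fun s => if P s then h2 s else true) := by
  induction l with
  | nil => simp
  | cons x l ih =>
    by_cases hP : P x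
    · simp [hP, h x (by simp) hP, ih (fun s hs => h s (by simp [hs]))]
    · simp [hP, ih (fun s hs => h s (by simp [hs]))]

-- first-wins insertion: the dict built by 'if k not in d: d[k] = v' looks up to the first match
theorem pv_first_get? (l : List (Int × String)) (d : PySem.Dict String Int) (v : String) :
    (l.foldl (fun d p => if d.contains p.2 then d else d.insert p.2 p.1) d).get? v
      = (d.get? v).or ((l.find? (fun p => p.2 == v)).map (·.1)) := by
  induction l generalizing d with
  | nil => simp
  | cons p l ih =>
    rw [List.foldl_cons, List.find?_cons]
    by_cases hc : d.contains p.2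
    · rw [if_pos hc, ih]
      by_cases hv : p.2 = v
      · subst hv
        have hs : (d.get? p.2).isSome := by
          rw [← PySem.Dict.contains_eq_isSome_get?]; exact hc
        obtain ⟨w, hw⟩ := Option.isSome_iff_exists.mp hs
        simp [hw]
      · simp [beq_false_of_ne hv]
    · rw [if_neg hc, ih]
      by_cases hv : p.2 = v
      · subst hv
        have hd : d.get? p.2 = none := by
          rw [PySem.Dict.get?_eq_none_iff_contains]; simpa using hc
        simp [hd, PySem.Dict.get?_insert_self]
      · rw [PySem.Dict.get?_insert_of_ne d p.1 (Ne.symm hv)]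
        simp [beq_false_of_ne hv]

-- last-wins insertion: the dict built by unconditional overwrite looks up to the last match
theorem pv_last_get? (C : String → Bool) (key : String → String)
    (l : List (Int × String)) (d : PySem.Dict String Int) (v : String) :
    (l.foldl (fun d p => if C p.2 then d.insert (key p.2) p.1 else d) d).get? v
      = (((l.filter (fun p => C p.2 && (key p.2 == v))).getLast?.map (·.1)).or (d.get? v)) := by
  induction l generalizing d with
  | nil => simp
  | cons p l ih =>
    rw [List.foldl_cons, List.filter_cons]
    by_cases hC : C p.2
    · rw [if_pos hC, ih]
      by_cases hk : key p.2 = v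
      · subst hk
        simp only [hC, beq_self_eq_true, Bool.and_self, if_pos, List.getLast?_cons]
        rw [PySem.Dict.get?_insert_self]
        cases hlast : (l.filter (fun p => C p.2 && (key p.2 == key p.2))).getLast? with
        | none => simp [hlast]
        | some q => simp [hlast]
      · rw [PySem.Dict.get?_insert_of_ne d p.1 (Ne.symm hk)]
        simp [hC, beq_false_of_ne hk]
    · rw [if_neg hC, ih]
      simp [hC]
theorem pv_mem_filter_enum (lst : List String) (M : String → Bool) (p : Int × String) :
    p ∈ (PySem.List.enumerate lst 0).filter (fun p => M p.2)
      ↔ ∃ j, ∃ _ : j < lst.length, p = ((j : Int), lst[j]) ∧ M (lst[j]) := by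
  rw [List.mem_filter, PySem.List.mem_enumerate_iff]
  constructor
  · rintro ⟨⟨k, hk, rfl⟩, hM⟩
    exact ⟨k, hk, by simp, by simpa using hM⟩
  · rintro ⟨j, hj, rfl, hM⟩
    exact ⟨⟨j, hj, by simp⟩, by simpa using hM⟩


theorem pv_idxOf? (l : List String) (v : String) (h : v ∈ l) :
    l.idxOf? v = some (l.idxOf v) := by
  induction l with
  | nil => simp at h
  | cons x l ih =>
    by_cases hx : x = v
    · subst hx; simp [List.idxOf?_cons, List.idxOf_cons]
    · have hvl : v ∈ l := by
        rcases List.mem_cons.mp h with h' | h'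
        · exact absurd h'.symm hx
        · exact h'
      simp [List.idxOf?_cons, List.idxOf_cons, beq_false_of_ne hx, ih hvl]

theorem pv_find_enum (l : List String) (s : Int) (v : String) (h : v ∈ l) :
    ((PySem.List.enumerate l s).find? (fun p => p.2 == v)).map (·.1)
      = some (s + (l.idxOf v : Int)) := by
  induction l generalizing s with
  | nil => simp at h
  | cons x l ih =>
    rw [PySem.List.enumerate_cons, List.find?_cons]
    by_cases hx : x = v
    · subst hx; simp [List.idxOf_cons]
    · have hvl : v ∈ l := by
        rcases List.mem_cons.mp h with h' | h'
        · exact absurd h'.symm hx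
        · exact h'
      simp only [beq_false_of_ne hx, List.idxOf_cons, cond_false]
      rw [ih (s + 1) hvl]
      congr 1
      push_cast
      omega

theorem pv_last_max : ∀ (l : List (Int × String)), l.Pairwise (fun a b => a.1 < b.1) →
    ∀ q : Int × String, l.getLast? = some q → ∀ p ∈ l, p.1 ≤ q.1 := by
  intro l
  induction l with
  | nil => intro _ q hq; simp at hq
  | cons a l ih =>
    intro hpw q hq p hp
    cases l with
    | nil =>
      simp at hq hp
      subst hq; subst hp; exact le_refl _
    | cons b m =>
      rw [List.getLast?_cons_cons] at hq
      rcases List.mem_cons.mp hp with h' | h'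
      · subst h'
        have hqmem : q ∈ b :: m := List.mem_of_getLast? hq
        exact le_of_lt ((List.pairwise_cons.mp hpw).1 q hqmem)
      · exact ih (List.pairwise_cons.mp hpw).2 q hq p h'

theorem pv_any_drop (lst : List String) (M : String → Bool) (k : Nat) :
    ((lst.drop k).any M = true) ↔ ∃ j, ∃ _ : j < lst.length, k ≤ j ∧ M (lst[j]) := by
  rw [List.any_eq_true]
  constructor
  · rintro ⟨x, hx, hM⟩
    obtain ⟨i, hi, rfl⟩ := List.mem_iff_getElem.mp hx
    have hlen : i < lst.length - k := by simpa using hi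
    refine ⟨k + i, by omega, by omega, ?_⟩
    rw [← List.getElem_drop]
    exact hM
  · rintro ⟨j, hj, hkj, hM⟩
    refine ⟨lst[j], ?_, hM⟩
    have h1 : k + (j - k) < lst.length := by omega
    have : lst[j] = (lst.drop k)[j - k]'(by simp; omega) := by
      rw [List.getElem_drop]
      congr 1
      omega
    rw [this]
    exact List.getElem_mem _

theorem pv_main (lst : List String) (M : String → Bool) (k : Nat) :
    (lst.drop k).any M
      = decide ((k : Int) ≤ ((((PySem.List.enumerate lst 0).filter
          (fun p => M p.2)).getLast?.map (·.1)).getD (-1))) := by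
  cases hJ : ((PySem.List.enumerate lst 0).filter (fun p => M p.2)).getLast? with
  | none =>
    have hnil : (PySem.List.enumerate lst 0).filter (fun p => M p.2) = [] :=
      List.getLast?_eq_none_iff.mp hJ
    have hany : (lst.drop k).any M = false := by
      rw [← Bool.not_eq_true, pv_any_drop]
      rintro ⟨j, hj, hkj, hM⟩
      have : ((j : Int), lst[j]) ∈ (PySem.List.enumerate lst 0).filter (fun p => M p.2) :=
        (pv_mem_filter_enum lst M _).mpr ⟨j, hj, rfl, hM⟩
      rw [hnil] at this
      simp at this
    rw [hany]
    have : ¬ ((k : Int) ≤ -1) := by omega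
    simp [this]
  | some q =>
    obtain ⟨j0, hj0, hq, hM0⟩ := (pv_mem_filter_enum lst M q).mp (List.mem_of_getLast? hJ)
    have hmax : ∀ p ∈ (PySem.List.enumerate lst 0).filter (fun p => M p.2), p.1 ≤ q.1 :=
      pv_last_max _ (List.Pairwise.filter _ (PySem.List.pairwise_lt_enumerate lst 0)) q hJ
    simp only [Option.map_some, Option.getD_some]
    by_cases hle : (k : Int) ≤ q.1
    · have hany : (lst.drop k).any M = true := by
        rw [pv_any_drop]
        refine ⟨j0, hj0, ?_, hM0⟩
        · have : q.1 = (j0 : Int) := by rw [hq]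
          omega
      rw [hany]
      simp [hle]
    · have hany : (lst.drop k).any M = false := by
        rw [← Bool.not_eq_true, pv_any_drop]
        rintro ⟨j, hj, hkj, hM⟩
        have hmem : ((j : Int), lst[j]) ∈ (PySem.List.enumerate lst 0).filter (fun p => M p.2) :=
          (pv_mem_filter_enum lst M _).mpr ⟨j, hj, rfl, hM⟩
        have := hmax _ hmem
        simp at this
        omega
      rw [hany]
      simp [hle]
-- lst.index(i), made total with getD, is idxOf for a member
theorem pv_index_getD (l : List String) (v : String) (h : v ∈ l) :
    (PySem.List.index? l v).getD 0 = l.idxOf v := by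
  rw [PySem.List.index?_eq_idxOf?, pv_idxOf? l v h]
  rfl

-- ===== VERDICT (by name: the statement is the Claim_ definition above) =====
theorem acceptable_spec : Claim_equal_acceptable := by
  intro lst pu dos _
  unfold Spec_acceptable
  have hA : acceptable lst pu dos
      = (lst.filterMap (fun i =>
          if PySem.Str.slice i none (some (PySem.Str.len pu)) == pu then
            some ((PySem.List.slice lst
                (some (((PySem.List.index? lst i).getD 0 : Nat) : Int)) none).foldl
              (fun d item =>
                if PySem.Str.slice item none (some (PySem.Str.len dos)) == dos then
                  if PySem.Str.stripChars item dos == PySem.Str.stripChars i pu then true else d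
                else d) false)
          else none)).all (fun x => x) := by
    exact pv_outer _ _ lst []
  have hB : acceptable_alt lst pu dos
      = lst.all (fun s =>
          if PySem.Str.slice s none (some (PySem.Str.len pu)) == pu then
            decide ((((PySem.List.enumerate lst 0).foldl
                (fun d p => if d.contains p.2 then d else d.insert p.2 p.1)
                PySem.Dict.empty).getD s 0)
              ≤ (((PySem.List.enumerate lst 0).foldl
                (fun d p =>
                  if PySem.Str.slice p.2 none (some (PySem.Str.len dos)) == dos then
                    d.insert (PySem.Str.stripChars p.2 dos) p.1
                  else d)
                PySem.Dict.empty).getD (PySem.Str.stripChars s pu) (-1)))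
          else true) := by
    simp only [acceptable_alt]
    rw [PySem.List.foldl_prod_mk
        (f := fun (d : PySem.Dict String Int) (p : Int × String) => if d.contains p.2 then d else d.insert p.2 p.1)
        (g := fun (d : PySem.Dict String Int) (p : Int × String) =>
          if PySem.Str.slice p.2 none (some (PySem.Str.len dos)) == dos then
            d.insert (PySem.Str.stripChars p.2 dos) p.1
          else d)]
  rw [hA, hB]
  apply pv_bridge
  intro s hs hPU
  rw [pv_index_getD lst s hs, PySem.List.slice_from_natCast, pv_innerfold, Bool.false_or]
  rw [PySem.Dict.getD_eq_get?_getD, PySem.Dict.getD_eq_get?_getD]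
  rw [pv_first_get?, PySem.Dict.get?_empty, Option.none_or, pv_find_enum lst 0 s hs]
  rw [pv_last_get? (C := fun x => PySem.Str.slice x none (some (PySem.Str.len dos)) == dos)
      (key := fun x => PySem.Str.stripChars x dos)]
  rw [PySem.Dict.get?_empty, Option.or_none]
  simp only [Option.getD_some, zero_add]
  exact pv_main lst
    (fun item => (PySem.Str.slice item none (some (PySem.Str.len dos)) == dos)
      && (PySem.Str.stripChars item dos == PySem.Str.stripChars s pu))
    (lst.idxOf s)
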